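-- pv_equiv track=rewrite | github.com/shubhamsugara22/AdventOfCode-202X | 2025/Day 7/Aoc7.py | count_timelines
-- ===== SOURCE A (Python) =====
-- from typing import List, Set, Tuple
-- from typing import List, Set, Tuple
--
-- def count_timelines(grid_lines: List[str]) -> int:
--     """
--     Simulate the quantum tachyon manifold and return the total beam strength
--     at the bottom row (number of beams that reach the exit).
--
--     Key insight: Beams can merge and their strengths accumulate. When beams
--     split at '^', the strength is divided and carried forward.
--     """
--     # Normalize grid
--     grid = [list(line.rstrip("\n")) for line in grid_lines]
--     if not grid:
--         return 0
--     R = len(grid)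
--     C = max(len(row) for row in grid) if grid else 0
--     for i in range(R):
--         if len(grid[i]) < C:
--             grid[i].extend([" "] * (C - len(grid[i])))
--
--     # Pad each row to width C
--     for row in grid:
--         while len(row) < C:
--             row.append(" ")
--
--     # Initialize beam strength matrix
--     strength = [[0] * C for _ in range(R)]
--
--     # Find source 'S' and initialize strength
--     active_cols = set()  # columns with active beams
--     for c in range(C):
--         if grid[0][c] == "S":
--             strength[0][c] = 1
--             active_cols.add(c)
--
--     # Process row by row
--     for y in range(R - 1):
--         next_active_cols = set()
--
--         for x in active_cols:
--             # Get cell at next row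
--             cell = grid[y + 1][x]
--
--             # Check if cell above is a splitter
--             cell_above = grid[y][x]
--             is_below_splitter = (cell_above == "^")
--
--             if cell == "^":
--                 # This row has a splitter: split the beam left and right
--                 left = x - 1
--                 right = x + 1
--
--                 if 0 <= left < C:
--                     strength[y + 1][left] += strength[y][x]
--                     next_active_cols.add(left)
--                 if 0 <= right < C:
--                     strength[y + 1][right] += strength[y][x]
--                     next_active_cols.add(right)
--             else:
--                 # Regular cell or 'S': beam continues if not directly below a splitter
--                 if not is_below_splitter:
--                     strength[y + 1][x] += strength[y][x]
--                     next_active_cols.add(x)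
--
--         active_cols = next_active_cols
--
--     # Return sum of strengths at the bottom row (beams reaching exit)
--     return sum(strength[R - 1])
-- ===== SOURCE B (Python) =====
-- def count_timelines(grid_lines):
--     rows = [line.rstrip("\n") for line in grid_lines]
--     if not rows:
--         return 0
--     C = max(len(r) for r in rows)
--     grid = [r.ljust(C) for r in rows]
--     # Backward pass: g[x] = number of bottom-row exits reachable by a beam now at (y, x).
--     g = [1] * C
--     for y in range(len(grid) - 2, -1, -1):
--         above, below = grid[y], grid[y + 1]
--         g = [
--             (g[x - 1] if x >= 1 else 0) + (g[x + 1] if x + 1 < C else 0)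
--             if below[x] == "^"
--             else (0 if above[x] == "^" else g[x])
--             for x in range(C)
--         ]
--     return sum(g[c] for c in range(C) if grid[0][c] == "S")
-- ===== Notes on version B (the rewrite author's own statement) =====
-- stated objective: alternative
-- what changed: B replaces A's top-down strength propagation with per-row active-column sets and a full R×C matrix by a bottom-up path-counting pass: one 1D array g where g[x] counts bottom-row exits reachable from (y,x), swept from the last row upward, and the answer is the sum of g over the source columns of row 0.
import Mathlib
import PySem

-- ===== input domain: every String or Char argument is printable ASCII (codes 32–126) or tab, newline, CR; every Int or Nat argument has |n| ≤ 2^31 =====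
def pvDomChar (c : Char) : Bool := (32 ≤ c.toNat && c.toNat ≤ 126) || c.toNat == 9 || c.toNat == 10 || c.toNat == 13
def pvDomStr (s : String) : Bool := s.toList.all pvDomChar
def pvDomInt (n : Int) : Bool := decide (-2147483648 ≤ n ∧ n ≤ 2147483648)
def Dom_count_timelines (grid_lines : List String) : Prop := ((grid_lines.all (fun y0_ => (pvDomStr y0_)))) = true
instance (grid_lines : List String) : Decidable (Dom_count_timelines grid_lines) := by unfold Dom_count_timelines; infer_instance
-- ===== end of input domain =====

-- B replaces A's top-down strength propagation (full R×C matrix + active-column sets) by a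
-- bottom-up path-counting pass over a single 1D array, summed over the source columns of row 0.

-- ===== PORT A =====
-- exact port of `line.rstrip("\n")`: drop the trailing '\n' characters
def pvRstripNl (s : String) : List Char :=
  (s.toList.reverse.dropWhile (fun c => c == '\n')).reverse

-- strength[y][x] (read; all accesses A makes are in range)
def pvMGet (m : List (List Int)) (y x : Int) : Int :=
  PySem.List.pyGetD (PySem.List.pyGetD m y []) x 0

-- strength[y][x] += v
def pvMAdd (m : List (List Int)) (y x : Int) (v : Int) : List (List Int) :=
  PySem.List.pySetD m y (PySem.List.pySetD (PySem.List.pyGetD m y []) x (pvMGet m y x + v))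

-- strength[y][x] = v
def pvMSet (m : List (List Int)) (y x : Int) (v : Int) : List (List Int) :=
  PySem.List.pySetD m y (PySem.List.pySetD (PySem.List.pyGetD m y []) x v)

-- body of A's inner `for x in active_cols` loop (state: strength matrix, next_active_cols)
def pvInner (grid : List (List Char)) (C y : Int)
    (q : List (List Int) × PySem.Set Int) (x : Int) : List (List Int) × PySem.Set Int :=
  let cell := PySem.List.pyGetD (PySem.List.pyGetD grid (y + 1) []) x ' '
  let cellAbove := PySem.List.pyGetD (PySem.List.pyGetD grid y []) x ' '
  if cell == '^' then
    let l := x - 1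
    let r := x + 1
    let q1 := if 0 ≤ l ∧ l < C then (pvMAdd q.1 (y + 1) l (pvMGet q.1 y x), PySem.Set.add q.2 l) else q
    if 0 ≤ r ∧ r < C then (pvMAdd q1.1 (y + 1) r (pvMGet q1.1 y x), PySem.Set.add q1.2 r) else q1
  else
    if cellAbove == '^' then q
    else (pvMAdd q.1 (y + 1) x (pvMGet q.1 y x), PySem.Set.add q.2 x)

def count_timelines (grid_lines : List String) : Int :=
  let grid0 := grid_lines.map pvRstripNl
  if grid0 = [] then 0
  else
    let R : Int := PySem.List.len grid0
    let C : Int := match grid0.map (fun row => PySem.List.len row) with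
      | [] => 0
      | h :: t => t.foldl max h
    -- first padding loop: `grid[i].extend([" "] * (C - len(grid[i])))` when short
    let grid1 := grid0.map (fun row =>
      if PySem.List.len row < C then row ++ List.replicate (C - PySem.List.len row).toNat ' ' else row)
    -- second padding loop: `while len(row) < C: row.append(" ")`
    let grid := grid1.map (fun row => row ++ List.replicate (C - PySem.List.len row).toNat ' ')
    let strength0 : List (List Int) := List.replicate R.toNat (List.replicate C.toNat 0)
    let init := (PySem.List.pyRange 0 C 1).foldl
      (fun st c =>
        if PySem.List.pyGetD (PySem.List.pyGetD grid 0 []) c ' ' == 'S' then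
          (pvMSet st.1 0 c 1, PySem.Set.add st.2 c)
        else st)
      (strength0, (PySem.Set.empty : PySem.Set Int))
    let fin := (PySem.List.pyRange 0 (R - 1) 1).foldl
      (fun st y => st.2.foldl (fun q x => pvInner grid C y q x) (st.1, (PySem.Set.empty : PySem.Set Int)))
      init
    (PySem.List.pyGetD fin.1 (R - 1) []).sum

-- ===== PORT B =====
-- r.ljust(C)
def pvLjust (r : List Char) (C : Nat) : List Char := r ++ List.replicate (C - r.length) ' '

-- B's per-row list comprehension: g'[x] = number of exits reachable from a beam at (y, x)
def pvBwdRow (C : Nat) (above below : List Char) (g : List Int) : List Int :=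
  (PySem.List.pyRange 0 (C : Int) 1).map (fun x =>
    if PySem.List.pyGetD below x ' ' == '^' then
      (if 1 ≤ x then PySem.List.pyGetD g (x - 1) 0 else 0) +
      (if x + 1 < (C : Int) then PySem.List.pyGetD g (x + 1) 0 else 0)
    else if PySem.List.pyGetD above x ' ' == '^' then 0
    else PySem.List.pyGetD g x 0)

def count_timelines_alt (grid_lines : List String) : Int :=
  let rows := grid_lines.map pvRstripNl
  if rows = [] then 0
  else
    let C : Nat := (rows.map List.length).foldl max 0
    let grid := rows.map (fun r => pvLjust r C)
    -- g = [1] * C, then the bottom-up sweep `for y in range(len(grid)-2, -1, -1)`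
    let fin := (PySem.List.pyRange (PySem.List.len grid - 2) (-1) (-1)).foldl
      (fun g y => pvBwdRow C (PySem.List.pyGetD grid y []) (PySem.List.pyGetD grid (y + 1) []) g)
      (List.replicate C 1)
    -- sum(g[c] for c in range(C) if grid[0][c] == "S")
    (((PySem.List.pyRange 0 (C : Int) 1).filter
        (fun c => PySem.List.pyGetD (PySem.List.pyGetD grid 0 []) c ' ' == 'S')).map
      (fun c => PySem.List.pyGetD fin c 0)).sum

-- ===== PRECONDITION & SPEC =====
def Spec_count_timelines (grid_lines : List String) (out : Int) : Prop := out = count_timelines_alt grid_lines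
instance (grid_lines : List String) (out : Int) : Decidable (Spec_count_timelines grid_lines out) := by unfold Spec_count_timelines; infer_instance

-- ===== CLAIM (what is proved, stated in full; the proofs are below) =====
def Claim_equal_count_timelines : Prop := ∀ (grid_lines : List String), Dom_count_timelines grid_lines → Spec_count_timelines grid_lines (count_timelines grid_lines)

-- ===== LEMMAS AND PROOFS =====

def pvAt (p : List Int) (c : Int) : Int := if 0 ≤ c then p.getD c.toNat 0 else 0

-- cur[c] += v (proof-side helper for characterising A's matrix updates row-wise)
def pvBump (cur : List Int) (c v : Int) : List Int :=
  PySem.List.pySetD cur c (PySem.List.pyGetD cur c 0 + v)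

-- the forward (top-down) one-row transfer A effectively performs, as a dense sweep (proof-side)
def pvStep (C : Nat) (prev : List Int) (above below : List Char) : List Int :=
  (PySem.List.pyRange 0 (C : Int) 1).foldl
    (fun cur x =>
      let s := PySem.List.pyGetD prev x 0
      if PySem.List.pyGetD below x ' ' == '^' then
        let cur1 := if 1 ≤ x then pvBump cur (x - 1) s else cur
        if x + 1 < (C : Int) then pvBump cur1 (x + 1) s else cur1
      else if PySem.List.pyGetD above x ' ' == '^' then cur
      else pvBump cur x s)
    (List.replicate C 0)

theorem pvAt_pySetD (cur : List Int) (i v : Int) (h0 : 0 ≤ i) (h : i.toNat < cur.length) (c : Int) :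
    pvAt (PySem.List.pySetD cur i v) c = if c = i then v else pvAt cur c := by
  unfold pvAt
  simp only [PySem.List.pySetD_of_nonneg cur v h0]
  by_cases hc : 0 ≤ c
  · simp only [hc, if_true]
    by_cases hci : c = i
    · subst hci
      simp [List.getD_eq_getElem?_getD, List.getElem?_set, h]
    · have hne : i.toNat ≠ c.toNat := by omega
      simp [List.getD_eq_getElem?_getD, List.getElem?_set, hci, hne]
  · have hci : c ≠ i := by omega
    simp [hc, hci]

theorem pv_pyGetD_eq_pvAt (p : List Int) (i : Int) (h0 : 0 ≤ i) :
    PySem.List.pyGetD p i 0 = pvAt p i := by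
  obtain ⟨n, rfl⟩ : ∃ n : Nat, i = (n : Int) := ⟨i.toNat, by omega⟩
  simp [pvAt]

theorem pvAt_pvBump (cur : List Int) (i v : Int) (h0 : 0 ≤ i) (h : i.toNat < cur.length) (c : Int) :
    pvAt (pvBump cur i v) c = if c = i then pvAt cur i + v else pvAt cur c := by
  unfold pvBump
  rw [pvAt_pySetD cur i _ h0 h c, pv_pyGetD_eq_pvAt cur i h0]

theorem pvBump_length (cur : List Int) (i v : Int) : (pvBump cur i v).length = cur.length := by
  unfold pvBump
  exact PySem.List.length_pySetD _ _ _

theorem pvAt_nonneg_ne (p : List Int) (c : Int) {L : Nat} (hlen : p.length = L)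
    (hne : pvAt p c ≠ 0) : 0 ≤ c ∧ c < (L : Int) := by
  unfold pvAt at hne
  by_cases hc : 0 ≤ c
  · refine ⟨hc, ?_⟩
    by_contra hlt
    have : L ≤ c.toNat := by omega
    rw [if_pos hc, List.getD_eq_getElem?_getD, List.getElem?_eq_none (by omega)] at hne
    simp at hne
  · simp [hc] at hne

def pvContrib (p : List Int) (above below : List Char) (C x c : Int) : Int :=
  if PySem.List.pyGetD below x ' ' == '^' then
    (if c = x - 1 ∧ 0 ≤ x - 1 ∧ x - 1 < C then pvAt p x else 0)
      + (if c = x + 1 ∧ 0 ≤ x + 1 ∧ x + 1 < C then pvAt p x else 0)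
  else if PySem.List.pyGetD above x ' ' == '^' then 0
  else if c = x then pvAt p x else 0

def pvHits (above below : List Char) (C x c : Int) : Prop :=
  if PySem.List.pyGetD below x ' ' == '^' then
    (c = x - 1 ∧ 0 ≤ x - 1 ∧ x - 1 < C) ∨ (c = x + 1 ∧ 0 ≤ x + 1 ∧ x + 1 < C)
  else if PySem.List.pyGetD above x ' ' == '^' then False
  else c = x

def pvGACur (p : List Int) (above below : List Char) (C : Int) (cur : List Int) (x : Int) : List Int :=
  if PySem.List.pyGetD below x ' ' == '^' then
    let cur1 := if 0 ≤ x - 1 ∧ x - 1 < C then pvBump cur (x - 1) (PySem.List.pyGetD p x 0) else cur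
    if 0 ≤ x + 1 ∧ x + 1 < C then pvBump cur1 (x + 1) (PySem.List.pyGetD p x 0) else cur1
  else if PySem.List.pyGetD above x ' ' == '^' then cur
  else pvBump cur x (PySem.List.pyGetD p x 0)

def pvGANa (above below : List Char) (C : Int) (na : PySem.Set Int) (x : Int) : PySem.Set Int :=
  if PySem.List.pyGetD below x ' ' == '^' then
    let na1 := if 0 ≤ x - 1 ∧ x - 1 < C then PySem.Set.add na (x - 1) else na
    if 0 ≤ x + 1 ∧ x + 1 < C then PySem.Set.add na1 (x + 1) else na1
  else if PySem.List.pyGetD above x ' ' == '^' then na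
  else PySem.Set.add na x

theorem pvGACur_step (p : List Int) (above below : List Char) (C : Int) (cur : List Int)
    (x : Int) (hx0 : 0 ≤ x) (hxC : x < C) (hlen : cur.length = C.toNat) :
    (pvGACur p above below C cur x).length = C.toNat ∧
      ∀ c, pvAt (pvGACur p above below C cur x) c = pvAt cur c + pvContrib p above below C x c := by
  unfold pvGACur pvContrib
  rw [pv_pyGetD_eq_pvAt p x hx0]
  by_cases hb : (PySem.List.pyGetD below x ' ' == '^') = true
  · simp only [if_pos hb]
    by_cases g1 : 0 ≤ x - 1 ∧ x - 1 < C <;> by_cases g2 : 0 ≤ x + 1 ∧ x + 1 < C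
    · have h1 : (x - 1).toNat < cur.length := by omega
      have h2 : (x + 1).toNat < (pvBump cur (x - 1) (pvAt p x)).length := by
        rw [pvBump_length]; omega
      refine ⟨by split_ifs <;> simp [pvBump_length, hlen], fun c => ?_⟩
      rw [if_pos g1, if_pos g2, pvAt_pvBump _ _ _ g2.1 h2,
        pvAt_pvBump _ _ _ g1.1 h1, pvAt_pvBump _ _ _ g1.1 h1]
      rw [if_neg (by omega : ¬(x + 1 = x - 1))]
      by_cases hc2 : c = x + 1
      · subst hc2
        rw [if_pos rfl, if_neg (by omega : ¬(x + 1 = x - 1 ∧ 0 ≤ x - 1 ∧ x - 1 < C)),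
          if_pos ⟨rfl, g2⟩]
        ring
      · rw [if_neg hc2, if_neg (show ¬(c = x + 1 ∧ 0 ≤ x + 1 ∧ x + 1 < C) by omega)]
        by_cases hc1 : c = x - 1
        · subst hc1; rw [if_pos rfl, if_pos ⟨rfl, g1⟩]; ring
        · rw [if_neg hc1, if_neg (show ¬(c = x - 1 ∧ 0 ≤ x - 1 ∧ x - 1 < C) by omega)]; ring
    · have h1 : (x - 1).toNat < cur.length := by omega
      refine ⟨by split_ifs <;> simp [pvBump_length, hlen], fun c => ?_⟩
      rw [if_pos g1, if_neg g2, pvAt_pvBump _ _ _ g1.1 h1,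
        if_neg (by omega : ¬(c = x + 1 ∧ 0 ≤ x + 1 ∧ x + 1 < C))]
      by_cases hc1 : c = x - 1
      · subst hc1; rw [if_pos rfl, if_pos ⟨rfl, g1⟩]; ring
      · rw [if_neg hc1, if_neg (show ¬(c = x - 1 ∧ 0 ≤ x - 1 ∧ x - 1 < C) by omega)]; ring
    · have h2 : (x + 1).toNat < cur.length := by omega
      refine ⟨by split_ifs <;> simp [pvBump_length, hlen], fun c => ?_⟩
      rw [if_neg g1, if_pos g2, pvAt_pvBump _ _ _ g2.1 h2,
        if_neg (by omega : ¬(c = x - 1 ∧ 0 ≤ x - 1 ∧ x - 1 < C))]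
      by_cases hc2 : c = x + 1
      · subst hc2; rw [if_pos rfl, if_pos ⟨rfl, g2⟩]; ring
      · rw [if_neg hc2, if_neg (show ¬(c = x + 1 ∧ 0 ≤ x + 1 ∧ x + 1 < C) by omega)]; ring
    · refine ⟨by split_ifs <;> simp [pvBump_length, hlen], fun c => ?_⟩
      rw [if_neg g1, if_neg g2,
        if_neg (by omega : ¬(c = x - 1 ∧ 0 ≤ x - 1 ∧ x - 1 < C)),
        if_neg (by omega : ¬(c = x + 1 ∧ 0 ≤ x + 1 ∧ x + 1 < C))]
      ring
  · simp only [if_neg hb]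
    by_cases ha : (PySem.List.pyGetD above x ' ' == '^') = true
    · simp only [if_pos ha]
      exact ⟨hlen, fun c => by ring⟩
    · simp only [if_neg ha]
      have h1 : x.toNat < cur.length := by omega
      refine ⟨by rw [pvBump_length]; exact hlen, fun c => ?_⟩
      rw [pvAt_pvBump _ _ _ hx0 h1]
      by_cases hc : c = x
      · subst hc; rw [if_pos rfl, if_pos rfl]
      · rw [if_neg hc, if_neg hc]; ring

theorem pvGANa_mem (above below : List Char) (C : Int) (na : PySem.Set Int) (x c : Int) :
    c ∈ pvGANa above below C na x ↔ c ∈ na ∨ pvHits above below C x c := by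
  unfold pvGANa pvHits
  by_cases hb : (PySem.List.pyGetD below x ' ' == '^') = true
  · simp only [if_pos hb]
    by_cases g1 : 0 ≤ x - 1 ∧ x - 1 < C <;> by_cases g2 : 0 ≤ x + 1 ∧ x + 1 < C
    · rw [if_pos g1, if_pos g2, PySem.Set.mem_add, PySem.Set.mem_add,
        and_iff_left g1, and_iff_left g2]
      tauto
    · rw [if_pos g1, if_neg g2, PySem.Set.mem_add, and_iff_left g1,
        iff_false_intro (fun h : c = x + 1 ∧ _ => g2 h.2)]
      tauto
    · rw [if_neg g1, if_pos g2, PySem.Set.mem_add, and_iff_left g2,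
        iff_false_intro (fun h : c = x - 1 ∧ _ => g1 h.2)]
      tauto
    · rw [if_neg g1, if_neg g2,
        iff_false_intro (fun h : c = x - 1 ∧ _ => g1 h.2),
        iff_false_intro (fun h : c = x + 1 ∧ _ => g2 h.2)]
      tauto
  · simp only [if_neg hb]
    by_cases ha : (PySem.List.pyGetD above x ' ' == '^') = true
    · simp only [if_pos ha]; simp
    · simp only [if_neg ha]
      rw [PySem.Set.mem_add]

theorem pvGANa_nodup (above below : List Char) (C : Int) (na : PySem.Set Int) (x : Int)
    (h : na.Nodup) : (pvGANa above below C na x).Nodup := by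
  unfold pvGANa
  split_ifs <;> repeat' apply PySem.Set.nodup_add
  all_goals exact h

theorem pvGANa_fold_mem (above below : List Char) (C : Int) (xs : List Int) (na : PySem.Set Int) (c : Int) :
    c ∈ xs.foldl (pvGANa above below C) na ↔ c ∈ na ∨ ∃ x ∈ xs, pvHits above below C x c := by
  induction xs generalizing na with
  | nil => simp
  | cons x xs ih =>
    simp only [List.foldl_cons, ih, pvGANa_mem, List.mem_cons]
    constructor
    · rintro ((h | h) | ⟨z, hz, h⟩)
      · exact Or.inl h
      · exact Or.inr ⟨x, Or.inl rfl, h⟩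
      · exact Or.inr ⟨z, Or.inr hz, h⟩
    · rintro (h | ⟨z, (rfl | hz), h⟩)
      · exact Or.inl (Or.inl h)
      · exact Or.inl (Or.inr h)
      · exact Or.inr ⟨z, hz, h⟩

theorem pvGANa_fold_nodup (above below : List Char) (C : Int) (xs : List Int) (na : PySem.Set Int)
    (h : na.Nodup) : (xs.foldl (pvGANa above below C) na).Nodup := by
  induction xs generalizing na with
  | nil => exact h
  | cons x xs ih => exact ih _ (pvGANa_nodup _ _ _ _ _ h)

theorem pvContrib_eq_zero (p : List Int) (above below : List Char) (C x c : Int)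
    (hp : pvAt p x = 0) : pvContrib p above below C x c = 0 := by
  unfold pvContrib
  split_ifs <;> simp [hp]

theorem pvContrib_nonneg (p : List Int) (above below : List Char) (C x c : Int)
    (hp : 0 ≤ pvAt p x) : 0 ≤ pvContrib p above below C x c := by
  unfold pvContrib
  split_ifs <;> simp [hp]

theorem pvContrib_ne_iff (p : List Int) (above below : List Char) (C x c : Int)
    (hp : pvAt p x ≠ 0) : pvContrib p above below C x c ≠ 0 ↔ pvHits above below C x c := by
  unfold pvContrib pvHits
  by_cases hb : (PySem.List.pyGetD below x ' ' == '^') = true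
  · simp only [if_pos hb]
    by_cases g1 : c = x - 1 ∧ 0 ≤ x - 1 ∧ x - 1 < C <;>
      by_cases g2 : c = x + 1 ∧ 0 ≤ x + 1 ∧ x + 1 < C
    · exfalso; omega
    · rw [if_pos g1, if_neg g2]
      simp only [add_zero]
      exact ⟨fun _ => Or.inl g1, fun _ => hp⟩
    · rw [if_neg g1, if_pos g2]
      simp only [zero_add]
      exact ⟨fun _ => Or.inr g2, fun _ => hp⟩
    · rw [if_neg g1, if_neg g2]
      exact iff_of_false (by simp) (fun h => h.elim g1 g2)
  · simp only [if_neg hb]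
    by_cases ha : (PySem.List.pyGetD above x ' ' == '^') = true
    · rw [if_pos ha, if_pos ha]
      simp
    · simp only [if_neg ha]
      by_cases hc : c = x
      · rw [if_pos hc]; simp [hc, hp]
      · rw [if_neg hc]; simp [hc]

theorem pv_foldl_pointwise (f : List Int → Int → List Int) (contrib : Int → Int → Int)
    (xs : List Int) (L : Nat)
    (hstep : ∀ cur x, x ∈ xs → cur.length = L →
      (f cur x).length = L ∧ ∀ c, pvAt (f cur x) c = pvAt cur c + contrib x c)
    (cur0 : List Int) (h0 : cur0.length = L) :
    (xs.foldl f cur0).length = L ∧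
      ∀ c, pvAt (xs.foldl f cur0) c = pvAt cur0 c + (xs.map (fun x => contrib x c)).sum := by
  induction xs generalizing cur0 with
  | nil => simpa using h0
  | cons x xs ih =>
    obtain ⟨hl, hv⟩ := hstep cur0 x (List.mem_cons_self) h0
    obtain ⟨ihl, ihv⟩ := ih (fun cur z hz hc => hstep cur z (List.mem_cons_of_mem _ hz) hc) (f cur0 x) hl
    refine ⟨ihl, fun c => ?_⟩
    rw [List.foldl_cons] at *
    rw [ihv c, hv c, List.map_cons, List.sum_cons]
    ring

theorem pv_sum_zero_filter (l : List Int) (f : Int → Int) (P : Int → Prop) [DecidablePred P]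
    (h : ∀ x ∈ l, ¬ P x → f x = 0) :
    (l.map f).sum = ((l.filter (fun x => decide (P x))).map f).sum := by
  induction l with
  | nil => simp
  | cons x l ih =>
    by_cases hp : P x
    · simp [List.filter_cons, hp, ih (fun z hz => h z (List.mem_cons_of_mem _ hz))]
    · simp [List.filter_cons, hp, h x List.mem_cons_self hp,
        ih (fun z hz => h z (List.mem_cons_of_mem _ hz))]

theorem pv_sum_sparse_dense (xs : List Int) (C : Int) (f : Int → Int) (hnd : xs.Nodup)
    (hsub : ∀ x ∈ xs, x ∈ PySem.List.pyRange 0 C 1)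
    (hzero : ∀ x, x ∈ PySem.List.pyRange 0 C 1 → x ∉ xs → f x = 0) :
    (xs.map f).sum = ((PySem.List.pyRange 0 C 1).map f).sum := by
  rw [pv_sum_zero_filter (PySem.List.pyRange 0 C 1) f (fun x => x ∈ xs)
    (fun x hx hnx => hzero x hx hnx)]
  have hperm : xs.Perm ((PySem.List.pyRange 0 C 1).filter (fun x => decide (x ∈ xs))) := by
    rw [List.perm_ext_iff_of_nodup hnd (List.Nodup.filter _ (PySem.List.nodup_pyRange_one 0 C))]
    intro a
    simp only [List.mem_filter, decide_eq_true_eq]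
    exact ⟨fun h => ⟨hsub a h, h⟩, fun h => h.2⟩
  rw [List.Perm.sum_eq (hperm.map f)]

theorem pv_sum_nonneg (l : List Int) (f : Int → Int) (h : ∀ x ∈ l, 0 ≤ f x) :
    0 ≤ (l.map f).sum :=
  List.sum_nonneg (by simpa using h)

theorem pv_sum_ne_zero_iff (l : List Int) (f : Int → Int) (h : ∀ x ∈ l, 0 ≤ f x) :
    (l.map f).sum ≠ 0 ↔ ∃ x ∈ l, f x ≠ 0 := by
  induction l with
  | nil => simp
  | cons x l ih =>
    have hx := h x List.mem_cons_self
    have hl := pv_sum_nonneg l f (fun z hz => h z (List.mem_cons_of_mem _ hz))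
    rw [List.map_cons, List.sum_cons]
    constructor
    · intro hne
      by_cases hfx : f x = 0
      · rw [hfx, zero_add] at hne
        obtain ⟨z, hz, hfz⟩ := (ih (fun z hz => h z (List.mem_cons_of_mem _ hz))).1 hne
        exact ⟨z, List.mem_cons_of_mem _ hz, hfz⟩
      · exact ⟨x, List.mem_cons_self, hfx⟩
    · rintro ⟨z, hz, hfz⟩ hsum
      rcases List.mem_cons.1 hz with rfl | hz'
      · have : f z = 0 := by omega
        exact hfz this
      · have h2 : (l.map f).sum ≠ 0 :=
          ((ih (fun w hw => h w (List.mem_cons_of_mem _ hw))).2 ⟨z, hz', hfz⟩)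
        omega

theorem pvAt_replicate (L : Nat) (v : Int) (c : Int) :
    pvAt (List.replicate L v) c = if 0 ≤ c ∧ c.toNat < L then v else 0 := by
  unfold pvAt
  split_ifs with hc h1 h2
  · rcases Nat.lt_or_ge c.toNat L with h | h
    · simp [List.getD_eq_getElem?_getD, List.getElem?_replicate, h]
    · omega
  · rcases Nat.lt_or_ge c.toNat L with h | h
    · exact absurd ⟨hc, h⟩ h1
    · simp [List.getD_eq_getElem?_getD, List.getElem?_replicate, Nat.not_lt.2 h]
  · omega
  · rfl

theorem pvAt_replicate_zero (L : Nat) (c : Int) : pvAt (List.replicate L (0 : Int)) c = 0 := by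
  rw [pvAt_replicate]
  split_ifs <;> rfl

-- one step of the dense forward sweep adds pvContrib, like pvGACur_step
theorem pvB_body_step (CB : Nat) (p : List Int) (above below : List Char) (cur : List Int)
    (x : Int) (hx0 : 0 ≤ x) (hxC : x < (CB : Int)) (hlen : cur.length = CB) :
    ((fun cur x =>
      let s := PySem.List.pyGetD p x 0
      if PySem.List.pyGetD below x ' ' == '^' then
        let cur1 := if 1 ≤ x then pvBump cur (x - 1) s else cur
        if x + 1 < (CB : Int) then pvBump cur1 (x + 1) s else cur1
      else if PySem.List.pyGetD above x ' ' == '^' then cur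
      else pvBump cur x s : List Int → Int → List Int) cur x).length = CB ∧
      ∀ c, pvAt ((fun cur x =>
        let s := PySem.List.pyGetD p x 0
        if PySem.List.pyGetD below x ' ' == '^' then
          let cur1 := if 1 ≤ x then pvBump cur (x - 1) s else cur
          if x + 1 < (CB : Int) then pvBump cur1 (x + 1) s else cur1
        else if PySem.List.pyGetD above x ' ' == '^' then cur
        else pvBump cur x s : List Int → Int → List Int) cur x) c =
        pvAt cur c + pvContrib p above below (CB : Int) x c := by
  have hC : (CB : Int).toNat = CB := by omega
  have hgc : pvGACur p above below (CB : Int) cur x =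
      (fun cur x =>
        let s := PySem.List.pyGetD p x 0
        if PySem.List.pyGetD below x ' ' == '^' then
          let cur1 := if 1 ≤ x then pvBump cur (x - 1) s else cur
          if x + 1 < (CB : Int) then pvBump cur1 (x + 1) s else cur1
        else if PySem.List.pyGetD above x ' ' == '^' then cur
        else pvBump cur x s : List Int → Int → List Int) cur x := by
    unfold pvGACur
    simp only []
    by_cases hb : (PySem.List.pyGetD below x ' ' == '^') = true
    · rw [if_pos hb, if_pos hb]
      have e1 : (0 ≤ x - 1 ∧ x - 1 < (CB : Int)) ↔ 1 ≤ x := by omega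
      have e2 : (0 ≤ x + 1 ∧ x + 1 < (CB : Int)) ↔ x + 1 < (CB : Int) := by omega
      rw [if_congr e1 rfl rfl, if_congr e2 rfl rfl]
    · rw [if_neg hb, if_neg hb]
  rw [← hgc]
  exact pvGACur_step p above below (CB : Int) cur x hx0 hxC (by omega)

theorem pvStep_pointwise (CB : Nat) (p : List Int) (above below : List Char)
    (hplen : p.length = CB) :
    (pvStep CB p above below).length = CB ∧
      ∀ c, pvAt (pvStep CB p above below) c =
        ((PySem.List.pyRange 0 (CB : Int) 1).map
          (fun x => pvContrib p above below (CB : Int) x c)).sum := by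
  unfold pvStep
  have h := pv_foldl_pointwise _ (pvContrib p above below (CB : Int))
    (PySem.List.pyRange 0 (CB : Int) 1) CB
    (fun cur x hx hc => by
      have hm := PySem.List.mem_pyRange_one.1 hx
      exact pvB_body_step CB p above below cur x hm.1 hm.2 hc)
    (List.replicate CB 0) (by simp)
  refine ⟨h.1, fun c => ?_⟩
  rw [h.2 c, pvAt_replicate_zero, zero_add]

theorem pv_eq_of_pvAt (p q : List Int) (h : p.length = q.length)
    (ha : ∀ c, pvAt p c = pvAt q c) : p = q := by
  apply List.ext_getElem h
  intro i h1 h2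
  have hi := ha (i : Int)
  unfold pvAt at hi
  simp only [Int.natCast_nonneg, if_true, Int.toNat_natCast] at hi
  rwa [List.getD_eq_getElem?_getD, List.getD_eq_getElem?_getD,
    List.getElem?_eq_getElem h1, List.getElem?_eq_getElem h2] at hi

-- everything established about one row step of A, against the dense forward sweep
theorem pv_row_step (above below : List Char) (CB : Nat) (p : List Int) (ac : PySem.Set Int)
    (hplen : p.length = CB) (hpnn : ∀ c, 0 ≤ pvAt p c) (hac : ac.Nodup)
    (hacm : ∀ c, c ∈ ac ↔ pvAt p c ≠ 0) :
    ac.foldl (pvGACur p above below (CB : Int)) (List.replicate CB 0) = pvStep CB p above below ∧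
      (pvStep CB p above below).length = CB ∧
      (∀ c, 0 ≤ pvAt (pvStep CB p above below) c) ∧
      (ac.foldl (pvGANa above below (CB : Int)) PySem.Set.empty).Nodup ∧
      (∀ c, c ∈ ac.foldl (pvGANa above below (CB : Int)) PySem.Set.empty ↔
        pvAt (pvStep CB p above below) c ≠ 0) := by
  have hbound : ∀ x ∈ ac, 0 ≤ x ∧ x < (CB : Int) := fun x hx =>
    pvAt_nonneg_ne p x hplen ((hacm x).1 hx)
  have hA := pv_foldl_pointwise (pvGACur p above below (CB : Int))
    (pvContrib p above below (CB : Int)) ac CB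
    (fun cur x hx hc => pvGACur_step p above below (CB : Int) cur x
      (hbound x hx).1 (hbound x hx).2 (by omega))
    (List.replicate CB 0) (by simp)
  have hB := pvStep_pointwise CB p above below hplen
  have hsum : ∀ c, (ac.map (fun x => pvContrib p above below (CB : Int) x c)).sum =
      ((PySem.List.pyRange 0 (CB : Int) 1).map (fun x => pvContrib p above below (CB : Int) x c)).sum := by
    intro c
    apply pv_sum_sparse_dense _ _ _ hac
    · intro x hx
      exact PySem.List.mem_pyRange_one.2 (hbound x hx)
    · intro x _ hnx
      have : ¬ pvAt p x ≠ 0 := fun hne => hnx ((hacm x).2 hne)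
      exact pvContrib_eq_zero _ _ _ _ _ _ (not_not.1 this)
  have hptw : ∀ c, pvAt (ac.foldl (pvGACur p above below (CB : Int)) (List.replicate CB 0)) c =
      pvAt (pvStep CB p above below) c := by
    intro c
    rw [hA.2 c, hB.2 c, pvAt_replicate_zero, zero_add, hsum c]
  refine ⟨pv_eq_of_pvAt _ _ (by rw [hA.1, hB.1]) hptw, hB.1, ?_, ?_, ?_⟩
  · intro c
    rw [hB.2 c]
    exact pv_sum_nonneg _ _ (fun x _ => pvContrib_nonneg p above below _ x c (hpnn x))
  · exact pvGANa_fold_nodup _ _ _ _ _ List.nodup_nil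
  · intro c
    rw [pvGANa_fold_mem, hB.2 c, ← hsum c,
      pv_sum_ne_zero_iff _ _ (fun x _ => pvContrib_nonneg p above below _ x c (hpnn x))]
    constructor
    · rintro (h | ⟨x, hx, hh⟩)
      · simp at h
      · exact ⟨x, hx, (pvContrib_ne_iff p above below _ x c ((hacm x).1 hx)).2 hh⟩
    · rintro ⟨x, hx, hh⟩
      exact Or.inr ⟨x, hx, (pvContrib_ne_iff p above below _ x c ((hacm x).1 hx)).1 hh⟩

def pvRow {A : Type} (m : List (List A)) (y : Int) : List A := PySem.List.pyGetD m y []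

theorem pvRow_pySetD {A : Type} (m : List (List A)) (i j : Int) (r : List A)
    (h0 : 0 ≤ i) (hi : i.toNat < m.length) (hj : 0 ≤ j) :
    pvRow (PySem.List.pySetD m i r) j = if j = i then r else pvRow m j := by
  obtain ⟨n, rfl⟩ : ∃ n : Nat, i = (n : Int) := ⟨i.toNat, by omega⟩
  obtain ⟨k, rfl⟩ : ∃ k : Nat, j = (k : Int) := ⟨j.toNat, by omega⟩
  unfold pvRow
  rw [PySem.List.pyGetD_pySetD_natCast m n k r [] (by simpa using hi)]
  by_cases h : k = n
  · simp [h]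
  · simp [h, fun hh : (k : Int) = (n : Int) => h (by omega)]

theorem pv_pySetD_pySetD {A : Type} (m : List A) (i : Int) (r1 r2 : A) (h0 : 0 ≤ i) :
    PySem.List.pySetD (PySem.List.pySetD m i r1) i r2 = PySem.List.pySetD m i r2 := by
  rw [PySem.List.pySetD_of_nonneg _ _ h0, PySem.List.pySetD_of_nonneg _ _ h0,
    PySem.List.pySetD_of_nonneg _ _ h0, List.set_set]

theorem pvMAdd_eq (m : List (List Int)) (i x v : Int) :
    pvMAdd m i x v = PySem.List.pySetD m i (pvBump (pvRow m i) x v) := rfl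

theorem pv_pySetD_self_row (m : List (List Int)) (i : Int) (h0 : 0 ≤ i)
    (hi : i.toNat < m.length) : PySem.List.pySetD m i (pvRow m i) = m := by
  obtain ⟨n, rfl⟩ : ∃ n : Nat, i = (n : Int) := ⟨i.toNat, by omega⟩
  have hn : n < m.length := by simpa using hi
  rw [PySem.List.pySetD_of_nonneg _ _ h0]
  have : pvRow m (n : Int) = m[n] := by
    unfold pvRow
    simp only [PySem.List.pyGetD_natCast, List.getD_eq_getElem?_getD,
      List.getElem?_eq_getElem hn, Option.getD_some]
  rw [this]
  simp only [Int.toNat_natCast]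
  exact List.set_getElem_self hn

theorem pvInner_factor (grid : List (List Char)) (C y : Int) (m : List (List Int))
    (na : PySem.Set Int) (x : Int) (hy : 0 ≤ y) (hm : (y + 1).toNat < m.length) :
    pvInner grid C y (m, na) x =
      (PySem.List.pySetD m (y + 1)
        (pvGACur (pvRow m y) (pvRow grid y) (pvRow grid (y + 1)) C (pvRow m (y + 1)) x),
       pvGANa (pvRow grid y) (pvRow grid (y + 1)) C na x) := by
  have hy1 : (0 : Int) ≤ y + 1 := by omega
  have hrow_touch : ∀ r : List Int, pvRow (PySem.List.pySetD m (y + 1) r) (y + 1) = r := by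
    intro r
    rw [pvRow_pySetD m (y + 1) (y + 1) r hy1 hm hy1, if_pos rfl]
  have hrow_keep : ∀ r : List Int, pvRow (PySem.List.pySetD m (y + 1) r) y = pvRow m y := by
    intro r
    rw [pvRow_pySetD m (y + 1) y r hy1 hm hy, if_neg (by omega)]
  have hget_keep : ∀ (r : List Int) (z : Int),
      pvMGet (PySem.List.pySetD m (y + 1) r) y z = pvMGet m y z := by
    intro r z
    unfold pvMGet
    have := hrow_keep r
    unfold pvRow at this
    rw [this]
  unfold pvInner pvGACur pvGANa
  simp only []
  by_cases hb : (PySem.List.pyGetD (pvRow grid (y + 1)) x ' ' == '^') = true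
  · have hb' : (PySem.List.pyGetD (PySem.List.pyGetD grid (y + 1) []) x ' ' == '^') = true := hb
    simp only [if_pos hb, if_pos hb']
    by_cases g1 : 0 ≤ x - 1 ∧ x - 1 < C <;> by_cases g2 : 0 ≤ x + 1 ∧ x + 1 < C
    · simp only [if_pos g1, if_pos g2]
      rw [pvMAdd_eq, pvMAdd_eq, hrow_touch, hget_keep, pv_pySetD_pySetD _ _ _ _ hy1]
      have hp : pvMGet m y x = PySem.List.pyGetD (pvRow m y) x 0 := rfl
      rw [hp]
    · simp only [if_pos g1, if_neg g2]
      rw [pvMAdd_eq]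
      rfl
    · simp only [if_neg g1, if_pos g2]
      rw [pvMAdd_eq]
      rfl
    · simp only [if_neg g1, if_neg g2]
      exact Prod.ext (by rw [pv_pySetD_self_row m (y + 1) hy1 hm]) rfl
  · have hb' : ¬ (PySem.List.pyGetD (PySem.List.pyGetD grid (y + 1) []) x ' ' == '^') = true := hb
    simp only [if_neg hb, if_neg hb']
    by_cases ha : (PySem.List.pyGetD (pvRow grid y) x ' ' == '^') = true
    · have ha' : (PySem.List.pyGetD (PySem.List.pyGetD grid y []) x ' ' == '^') = true := ha
      simp only [if_pos ha, if_pos ha']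
      exact Prod.ext (by rw [pv_pySetD_self_row m (y + 1) hy1 hm]) rfl
    · have ha' : ¬ (PySem.List.pyGetD (PySem.List.pyGetD grid y []) x ' ' == '^') = true := ha
      simp only [if_neg ha, if_neg ha']
      rw [pvMAdd_eq]
      rfl

theorem pvInner_foldl_factor (grid : List (List Char)) (C y : Int) (xs : List Int)
    (m : List (List Int)) (na : PySem.Set Int) (hy : 0 ≤ y) (hm : (y + 1).toNat < m.length) :
    xs.foldl (pvInner grid C y) (m, na) =
      (PySem.List.pySetD m (y + 1)
        (xs.foldl (pvGACur (pvRow m y) (pvRow grid y) (pvRow grid (y + 1)) C) (pvRow m (y + 1))),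
       xs.foldl (pvGANa (pvRow grid y) (pvRow grid (y + 1)) C) na) := by
  have hy1 : (0 : Int) ≤ y + 1 := by omega
  induction xs generalizing m na with
  | nil =>
    simp only [List.foldl_nil]
    have h := pv_pySetD_self_row m (y + 1) hy1 hm
    exact Prod.ext h.symm rfl
  | cons x xs ih =>
    simp only [List.foldl_cons]
    rw [pvInner_factor grid C y m na x hy hm]
    set r1 := pvGACur (pvRow m y) (pvRow grid y) (pvRow grid (y + 1)) C (pvRow m (y + 1)) x with hr1
    have hm' : (y + 1).toNat < (PySem.List.pySetD m (y + 1) r1).length := by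
      rw [PySem.List.length_pySetD]; exact hm
    rw [ih (PySem.List.pySetD m (y + 1) r1) _ hm']
    rw [pvRow_pySetD m (y + 1) y r1 hy1 hm hy, if_neg (by omega),
      pvRow_pySetD m (y + 1) (y + 1) r1 hy1 hm hy1, if_pos rfl,
      pv_pySetD_pySetD m (y + 1) r1 _ hy1]

theorem pv_outer (grid : List (List Char)) (CB : Nat)
    (st0 : List (List Int) × PySem.Set Int) (p0 : List Int)
    (hm0len : st0.1.length = grid.length)
    (hrow0 : pvRow st0.1 0 = p0)
    (hzero : ∀ j : Nat, 0 < j → j < grid.length → pvRow st0.1 (j : Int) = List.replicate CB (0 : Int))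
    (hp0len : p0.length = CB) (hp0nn : ∀ c, 0 ≤ pvAt p0 c)
    (hac : st0.2.Nodup) (hacm : ∀ c, c ∈ st0.2 ↔ pvAt p0 c ≠ 0)
    (k : Nat) (hk : k < grid.length) :
    (((PySem.List.pyRange 0 (k : Int) 1).foldl
        (fun st y => st.2.foldl (fun q x => pvInner grid (CB : Int) y q x)
          (st.1, (PySem.Set.empty : PySem.Set Int))) st0).1.length = grid.length) ∧
    (pvRow ((PySem.List.pyRange 0 (k : Int) 1).foldl
        (fun st y => st.2.foldl (fun q x => pvInner grid (CB : Int) y q x)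
          (st.1, (PySem.Set.empty : PySem.Set Int))) st0).1 (k : Int) =
      ((grid.zip grid.tail).take k).foldl (fun p ab => pvStep CB p ab.1 ab.2) p0) ∧
    (∀ j : Nat, k < j → j < grid.length →
      pvRow ((PySem.List.pyRange 0 (k : Int) 1).foldl
        (fun st y => st.2.foldl (fun q x => pvInner grid (CB : Int) y q x)
          (st.1, (PySem.Set.empty : PySem.Set Int))) st0).1 (j : Int) = List.replicate CB (0 : Int)) ∧
    ((((grid.zip grid.tail).take k).foldl (fun p ab => pvStep CB p ab.1 ab.2) p0).length = CB) ∧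
    (∀ c, 0 ≤ pvAt (((grid.zip grid.tail).take k).foldl (fun p ab => pvStep CB p ab.1 ab.2) p0) c) ∧
    (((PySem.List.pyRange 0 (k : Int) 1).foldl
        (fun st y => st.2.foldl (fun q x => pvInner grid (CB : Int) y q x)
          (st.1, (PySem.Set.empty : PySem.Set Int))) st0).2.Nodup) ∧
    (∀ c, c ∈ ((PySem.List.pyRange 0 (k : Int) 1).foldl
        (fun st y => st.2.foldl (fun q x => pvInner grid (CB : Int) y q x)
          (st.1, (PySem.Set.empty : PySem.Set Int))) st0).2 ↔
      pvAt (((grid.zip grid.tail).take k).foldl (fun p ab => pvStep CB p ab.1 ab.2) p0) c ≠ 0) := by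
  induction k with
  | zero =>
    simp only [Int.natCast_zero, PySem.List.pyRange_zero, List.foldl_nil, List.take_zero]
    exact ⟨hm0len, hrow0, fun j hj hjl => hzero j hj hjl, hp0len, hp0nn, hac, hacm⟩
  | succ k ihk =>
    have hk' : k < grid.length := by omega
    obtain ⟨ih1, ih2, ih3, ih4, ih5, ih6, ih7⟩ := ihk hk'
    set st := ((PySem.List.pyRange 0 (k : Int) 1).foldl
        (fun st y => st.2.foldl (fun q x => pvInner grid (CB : Int) y q x)
          (st.1, (PySem.Set.empty : PySem.Set Int))) st0) with hst
    set p := ((grid.zip grid.tail).take k).foldl (fun p ab => pvStep CB p ab.1 ab.2) p0 with hp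
    have hrange : PySem.List.pyRange 0 ((k + 1 : Nat) : Int) 1 =
        PySem.List.pyRange 0 (k : Int) 1 ++ [(k : Int)] := by
      have := PySem.List.pyRange_one_succ_right (a := 0) (b := (k : Int)) (by omega)
      rw [← this]
      norm_num
    have hziplen : (grid.zip grid.tail).length = grid.length - 1 := by
      simp [List.length_zip, List.length_tail]
    have hzk : k < (grid.zip grid.tail).length := by omega
    have hzel : (grid.zip grid.tail)[k] = (grid[k]'(by omega), grid[k + 1]'(by omega)) := by
      rw [List.getElem_zip]
      congr 1
      rw [List.getElem_tail]
    have htake : (grid.zip grid.tail).take (k + 1) =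
        (grid.zip grid.tail).take k ++ [(grid[k]'(by omega), grid[k + 1]'(by omega))] := by
      rw [List.take_succ, List.getElem?_eq_getElem hzk, hzel]
      rfl
    rw [hrange, htake, List.foldl_append, List.foldl_append]
    simp only [List.foldl_cons, List.foldl_nil]
    rw [← hst, ← hp]
    have hrowk : pvRow grid (k : Int) = grid[k]'(by omega) := by
      unfold pvRow
      rw [PySem.List.pyGetD_natCast, List.getD_eq_getElem?_getD,
        List.getElem?_eq_getElem (show k < grid.length by omega)]
      rfl
    have hrowk1 : pvRow grid ((k : Int) + 1) = grid[k + 1]'(by omega) := by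
      unfold pvRow
      rw [show (k : Int) + 1 = ((k + 1 : Nat) : Int) by omega, PySem.List.pyGetD_natCast,
        List.getD_eq_getElem?_getD, List.getElem?_eq_getElem (show k + 1 < grid.length by omega)]
      rfl
    have hm1 : ((k : Int) + 1).toNat < st.1.length := by
      rw [ih1]; omega
    rw [pvInner_foldl_factor grid (CB : Int) (k : Int) st.2 st.1 PySem.Set.empty (by omega) hm1]
    have hrowy : pvRow st.1 (k : Int) = p := ih2
    have hrowy1 : pvRow st.1 ((k : Int) + 1) = List.replicate CB (0 : Int) := by
      rw [show (k : Int) + 1 = ((k + 1 : Nat) : Int) by omega]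
      exact ih3 (k + 1) (by omega) (by omega)
    rw [hrowy, hrowy1, hrowk, hrowk1]
    obtain ⟨hstep1, hstep2, hstep3, hstep4, hstep5⟩ :=
      pv_row_step (grid[k]'(by omega)) (grid[k + 1]'(by omega)) CB p st.2 ih4 ih5 ih6 ih7
    rw [hstep1]
    refine ⟨by rw [PySem.List.length_pySetD]; exact ih1, ?_, ?_, hstep2, hstep3, hstep4, hstep5⟩
    · rw [show ((k + 1 : Nat) : Int) = (k : Int) + 1 by omega]
      rw [pvRow_pySetD st.1 ((k : Int) + 1) ((k : Int) + 1) _ (by omega) hm1 (by omega), if_pos rfl]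
    · intro j hj hjl
      rw [pvRow_pySetD st.1 ((k : Int) + 1) (j : Int) _ (by omega) hm1 (by omega),
        if_neg (by omega)]
      exact ih3 j (by omega) hjl

theorem pv_if_pair_split {A B : Type} (P : Int → Prop) [DecidablePred P]
    (f : A → Int → A) (g : B → Int → B) (xs : List Int) (a : A) (b : B) :
    xs.foldl (fun st c => if P c then (f st.1 c, g st.2 c) else st) (a, b) =
      (xs.foldl (fun m c => if P c then f m c else m) a,
       xs.foldl (fun s c => if P c then g s c else s) b) := by
  induction xs generalizing a b with
  | nil => rfl
  | cons x xs ih =>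
    simp only [List.foldl_cons]
    by_cases h : P x
    · simp only [if_pos h]; exact ih _ _
    · simp only [if_neg h]; exact ih _ _

theorem pv_init_factor (S : Int → Bool) (xs : List Int) (m : List (List Int)) (hm : 0 < m.length) :
    xs.foldl (fun m c => if S c then pvMSet m 0 c 1 else m) m =
      PySem.List.pySetD m 0
        (xs.foldl (fun r c => if S c then PySem.List.pySetD r c 1 else r) (pvRow m 0)) := by
  induction xs generalizing m with
  | nil =>
    simp only [List.foldl_nil]
    exact (pv_pySetD_self_row m 0 le_rfl (by simpa using hm)).symm
  | cons x xs ih =>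
    simp only [List.foldl_cons]
    by_cases h : S x
    · simp only [if_pos h]
      have hrw : pvMSet m 0 x 1 = PySem.List.pySetD m 0 (PySem.List.pySetD (pvRow m 0) x 1) := rfl
      rw [hrw, ih _ (by rw [PySem.List.length_pySetD]; exact hm)]
      rw [pvRow_pySetD m 0 0 _ le_rfl (by simpa using hm) le_rfl, if_pos rfl,
        pv_pySetD_pySetD m 0 _ _ le_rfl]
    · simp only [if_neg h]
      exact ih m hm

theorem pv_initrow (S : Int → Bool) (xs : List Int) (r : List Int)
    (hx : ∀ x ∈ xs, 0 ≤ x ∧ x.toNat < r.length) :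
    (xs.foldl (fun r c => if S c then PySem.List.pySetD r c 1 else r) r).length = r.length ∧
      ∀ c, pvAt (xs.foldl (fun r c => if S c then PySem.List.pySetD r c 1 else r) r) c =
        if c ∈ xs ∧ S c then 1 else pvAt r c := by
  induction xs generalizing r with
  | nil => simp
  | cons x xs ih =>
    have hx0 := hx x List.mem_cons_self
    set r1 := if S x then PySem.List.pySetD r x 1 else r with hr1
    have hlen1 : r1.length = r.length := by
      rw [hr1]; split_ifs <;> simp [PySem.List.length_pySetD]
    obtain ⟨ihl, ihv⟩ := ih r1 (fun z hz => by rw [hlen1]; exact hx z (List.mem_cons_of_mem _ hz))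
    simp only [List.foldl_cons, ← hr1]
    refine ⟨by rw [ihl, hlen1], fun c => ?_⟩
    rw [ihv c]
    have hv1 : pvAt r1 c = if c = x ∧ S x then 1 else pvAt r c := by
      rw [hr1]
      by_cases hs : S x
      · rw [if_pos hs, pvAt_pySetD r x 1 hx0.1 hx0.2 c]
        by_cases hc : c = x <;> simp [hc, hs]
      · rw [if_neg hs]
        simp [hs]
    rw [hv1]
    by_cases h1 : c ∈ xs ∧ S c
    · simp [h1, List.mem_cons_of_mem _ h1.1]
    · by_cases h2 : c = x ∧ S x
      · have : c ∈ x :: xs ∧ S c := ⟨by simp [h2.1], by rw [h2.1]; exact h2.2⟩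
        simp [h1, h2, this]
      · have : ¬ (c ∈ x :: xs ∧ S c) := by
          rintro ⟨hc, hsc⟩
          rcases List.mem_cons.1 hc with rfl | hc'
          · exact h2 ⟨rfl, hsc⟩
          · exact h1 ⟨hc', hsc⟩
        simp only [h1, h2, this, if_false]

theorem pv_initac (S : Int → Bool) (xs : List Int) (s0 : PySem.Set Int) :
    ((∀ c, c ∈ xs.foldl (fun s c => if S c then PySem.Set.add s c else s) s0 ↔
        c ∈ s0 ∨ (c ∈ xs ∧ S c)) ∧
      (s0.Nodup → (xs.foldl (fun s c => if S c then PySem.Set.add s c else s) s0).Nodup)) := by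
  induction xs generalizing s0 with
  | nil => simp
  | cons x xs ih =>
    simp only [List.foldl_cons]
    constructor
    · intro c
      rw [(ih _).1 c]
      by_cases hs : S x
      · rw [if_pos hs, PySem.Set.mem_add]
        constructor
        · rintro ((h | rfl) | h)
          · exact Or.inl h
          · exact Or.inr ⟨List.mem_cons_self, hs⟩
          · exact Or.inr ⟨List.mem_cons_of_mem _ h.1, h.2⟩
        · rintro (h | ⟨hc, hsc⟩)
          · exact Or.inl (Or.inl h)
          · rcases List.mem_cons.1 hc with rfl | hc'
            · exact Or.inl (Or.inr rfl)
            · exact Or.inr ⟨hc', hsc⟩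
      · rw [if_neg hs]
        constructor
        · rintro (h | h)
          · exact Or.inl h
          · exact Or.inr ⟨List.mem_cons_of_mem _ h.1, h.2⟩
        · rintro (h | ⟨hc, hsc⟩)
          · exact Or.inl h
          · rcases List.mem_cons.1 hc with rfl | hc'
            · exact absurd hsc (by simpa using hs)
            · exact Or.inr ⟨hc', hsc⟩
    · intro h0
      apply (ih _).2
      split_ifs
      · exact PySem.Set.nodup_add _ _ h0
      · exact h0

theorem pvAt_map_pyRange (f : Int → Int) (n : Nat) (c : Int) :
    pvAt ((PySem.List.pyRange 0 (n : Int) 1).map f) c =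
      if 0 ≤ c ∧ c < (n : Int) then f c else 0 := by
  have hlen : ((PySem.List.pyRange 0 (n : Int) 1).map f).length = n := by
    simp [PySem.List.length_pyRange_one]
  unfold pvAt
  by_cases hc : 0 ≤ c
  · rw [if_pos hc]
    by_cases hcn : c < (n : Int)
    · have hlt : c.toNat < n := by omega
      rw [if_pos ⟨hc, hcn⟩, List.getD_eq_getElem?_getD,
        List.getElem?_eq_getElem (by rw [hlen]; exact hlt)]
      simp only [Option.getD_some, List.getElem_map,
        PySem.List.getElem_pyRange_one]
      congr 1
      omega
    · rw [if_neg (by omega : ¬(0 ≤ c ∧ c < (n : Int))), List.getD_eq_getElem?_getD,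
        List.getElem?_eq_none (by rw [hlen]; omega)]
      rfl
  · rw [if_neg hc, if_neg (by omega : ¬(0 ≤ c ∧ c < (n : Int)))]

theorem pvRow_replicate (R CB : Nat) (j : Nat) (hj : j < R) :
    pvRow (List.replicate R (List.replicate CB (0 : Int))) (j : Int) = List.replicate CB 0 := by
  unfold pvRow
  rw [PySem.List.pyGetD_natCast, List.getD_eq_getElem?_getD,
    List.getElem?_eq_getElem (by simpa using hj)]
  simp

-- A's source-row initialisation equals the indicator row, with all invariants
theorem pv_init_state (S : Int → Bool) (R CB : Nat) (hR : 0 < R) :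
    (((PySem.List.pyRange 0 (CB : Int) 1).foldl
        (fun st c => if S c then (pvMSet st.1 0 c 1, PySem.Set.add st.2 c) else st)
        (List.replicate R (List.replicate CB 0), (PySem.Set.empty : PySem.Set Int))).1.length = R) ∧
    (pvRow ((PySem.List.pyRange 0 (CB : Int) 1).foldl
        (fun st c => if S c then (pvMSet st.1 0 c 1, PySem.Set.add st.2 c) else st)
        (List.replicate R (List.replicate CB 0), (PySem.Set.empty : PySem.Set Int))).1 0 =
      (PySem.List.pyRange 0 (CB : Int) 1).map (fun c => if S c then (1 : Int) else 0)) ∧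
    (∀ j : Nat, 0 < j → j < R →
      pvRow ((PySem.List.pyRange 0 (CB : Int) 1).foldl
        (fun st c => if S c then (pvMSet st.1 0 c 1, PySem.Set.add st.2 c) else st)
        (List.replicate R (List.replicate CB 0), (PySem.Set.empty : PySem.Set Int))).1 (j : Int) =
      List.replicate CB 0) ∧
    (((PySem.List.pyRange 0 (CB : Int) 1).map (fun c => if S c then (1 : Int) else 0)).length = CB) ∧
    (∀ c, 0 ≤ pvAt ((PySem.List.pyRange 0 (CB : Int) 1).map (fun c => if S c then (1 : Int) else 0)) c) ∧
    (((PySem.List.pyRange 0 (CB : Int) 1).foldl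
        (fun st c => if S c then (pvMSet st.1 0 c 1, PySem.Set.add st.2 c) else st)
        (List.replicate R (List.replicate CB 0), (PySem.Set.empty : PySem.Set Int))).2.Nodup) ∧
    (∀ c, c ∈ ((PySem.List.pyRange 0 (CB : Int) 1).foldl
        (fun st c => if S c then (pvMSet st.1 0 c 1, PySem.Set.add st.2 c) else st)
        (List.replicate R (List.replicate CB 0), (PySem.Set.empty : PySem.Set Int))).2 ↔
      pvAt ((PySem.List.pyRange 0 (CB : Int) 1).map (fun c => if S c then (1 : Int) else 0)) c ≠ 0) := by
  set xs := PySem.List.pyRange 0 (CB : Int) 1 with hxs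
  set m0 : List (List Int) := List.replicate R (List.replicate CB 0) with hm0
  have hsplit : xs.foldl
      (fun st c => if S c then (pvMSet st.1 0 c 1, PySem.Set.add st.2 c) else st)
      (m0, (PySem.Set.empty : PySem.Set Int)) =
      (xs.foldl (fun m c => if S c then pvMSet m 0 c 1 else m) m0,
       xs.foldl (fun s c => if S c then PySem.Set.add s c else s) PySem.Set.empty) :=
    pv_if_pair_split (fun c => S c = true) (fun m c => pvMSet m 0 c 1)
      (fun s c => PySem.Set.add s c) xs m0 PySem.Set.empty
  rw [hsplit]
  have hm0len : m0.length = R := by simp [hm0]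
  have hrow00 : pvRow m0 0 = List.replicate CB 0 := by
    have := pvRow_replicate R CB 0 hR
    simpa using this
  have hfac := pv_init_factor S xs m0 (by omega)
  have hxbound : ∀ x ∈ xs, 0 ≤ x ∧ x.toNat < (pvRow m0 0).length := by
    intro x hx
    have := PySem.List.mem_pyRange_one.1 hx
    rw [hrow00]
    constructor
    · omega
    · simp
      omega
  obtain ⟨hrlen, hrval⟩ := pv_initrow S xs (pvRow m0 0) hxbound
  have hprev0len : (xs.map (fun c => if S c then (1 : Int) else 0)).length = CB := by
    simp [hxs, PySem.List.length_pyRange_one]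
  have hprev0at : ∀ c, pvAt (xs.map (fun c => if S c then (1 : Int) else 0)) c =
      if 0 ≤ c ∧ c < (CB : Int) then (if S c then (1 : Int) else 0) else 0 := by
    intro c
    rw [hxs]
    exact pvAt_map_pyRange (fun c => if S c then (1 : Int) else 0) CB c
  have hroweq : xs.foldl (fun r c => if S c then PySem.List.pySetD r c 1 else r) (pvRow m0 0) =
      xs.map (fun c => if S c then (1 : Int) else 0) := by
    apply pv_eq_of_pvAt
    · rw [hrlen, hrow00, hprev0len]; simp
    · intro c
      rw [hrval c, hprev0at c, hrow00]
      by_cases hc : 0 ≤ c ∧ c < (CB : Int)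
      · have hcx : c ∈ xs := by rw [hxs]; exact PySem.List.mem_pyRange_one.2 hc
        by_cases hs : S c
        · simp [hcx, hs, hc]
        · simp [hs, hc, pvAt_replicate_zero]
      · have hcx : c ∉ xs := by
          rw [hxs]; intro hmem
          exact hc (PySem.List.mem_pyRange_one.1 hmem)
        simp [hcx, hc, pvAt_replicate_zero]
  have hmlen2 : (xs.foldl (fun m c => if S c then pvMSet m 0 c 1 else m) m0).length = R := by
    rw [hfac, PySem.List.length_pySetD, hm0len]
  obtain ⟨hacmem, hacnd⟩ := pv_initac S xs PySem.Set.empty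
  refine ⟨hmlen2, ?_, ?_, hprev0len, ?_, hacnd List.nodup_nil, ?_⟩
  · rw [hfac, pvRow_pySetD m0 0 0 _ le_rfl (by omega) le_rfl, if_pos rfl, hroweq]
  · intro j hj hjl
    rw [hfac, pvRow_pySetD m0 0 (j : Int) _ le_rfl (by omega) (by omega), if_neg (by omega)]
    exact pvRow_replicate R CB j hjl
  · intro c
    rw [hprev0at c]
    split_ifs <;> simp
  · intro c
    rw [hacmem c, hprev0at c]
    constructor
    · rintro (h | ⟨hcx, hsc⟩)
      · simp at h
      · have hb := PySem.List.mem_pyRange_one.1 (by rw [hxs] at hcx; exact hcx)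
        simp [hb, hsc]
    · intro h
      by_cases hc : 0 ≤ c ∧ c < (CB : Int)
      · rw [if_pos hc] at h
        by_cases hs : S c
        · exact Or.inr ⟨by rw [hxs]; exact PySem.List.mem_pyRange_one.2 hc, hs⟩
        · rw [if_neg hs] at h; exact absurd rfl h
      · rw [if_neg hc] at h; exact absurd rfl h

theorem pv_foldl_max_cast (t : List Nat) (h : Nat) :
    List.foldl max ((h : Int)) (t.map (fun x : Nat => (x : Int))) = ((t.foldl max h : Nat) : Int) := by
  induction t generalizing h with
  | nil => rfl
  | cons x t ih =>
    rw [List.map_cons, List.foldl_cons, List.foldl_cons,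
      show max (h : Int) (x : Int) = ((max h x : Nat) : Int) from by simp [Nat.cast_max]]
    exact ih (max h x)

theorem pv_pad_eq (row : List Char) (CB : Nat) (hle : row.length ≤ CB) :
    (if PySem.List.len row < ((CB : Nat) : Int) then
        row ++ List.replicate (((CB : Int)) - PySem.List.len row).toNat ' ' else row) ++
      List.replicate (((CB : Int)) -
        PySem.List.len (if PySem.List.len row < ((CB : Nat) : Int) then
          row ++ List.replicate (((CB : Int)) - PySem.List.len row).toNat ' ' else row)).toNat ' ' =
    pvLjust row CB := by
  unfold pvLjust
  by_cases h : row.length < CB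
  · rw [if_pos (by simp only [PySem.List.len_eq, List.length_append, List.length_replicate]; omega)]
    have h1 : (((CB : Int)) - PySem.List.len row).toNat = CB - row.length := by
      simp only [PySem.List.len_eq, List.length_append, List.length_replicate]; omega
    rw [h1]
    have h2 : (((CB : Int)) - PySem.List.len (row ++ List.replicate (CB - row.length) ' ')).toNat = 0 := by
      simp only [PySem.List.len_eq, List.length_append, List.length_replicate]; omega
    rw [h2]
    simp
  · rw [if_neg (by simp only [PySem.List.len_eq, List.length_append, List.length_replicate]; omega)]
    have h1 : (((CB : Int)) - PySem.List.len row).toNat = 0 := by simp only [PySem.List.len_eq, List.length_append, List.length_replicate]; omega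
    have h2 : CB - row.length = 0 := by omega
    rw [h1, h2]

theorem pvRow_def (m : List (List Int)) (y : Int) : PySem.List.pyGetD m y [] = pvRow m y := rfl

-- ===== the forward/backward adjointness layer =====

-- the 0/1 transfer weight of one row: does a beam at column x feed column c of the next row?
def pvWt (above below : List Char) (C x c : Int) : Int :=
  if PySem.List.pyGetD below x ' ' == '^' then
    (if c = x - 1 ∧ 0 ≤ x - 1 ∧ x - 1 < C then 1 else 0) +
    (if c = x + 1 ∧ 0 ≤ x + 1 ∧ x + 1 < C then 1 else 0)
  else if PySem.List.pyGetD above x ' ' == '^' then 0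
  else if c = x then 1 else 0

theorem pvContrib_eq_wt (p : List Int) (above below : List Char) (C x c : Int) :
    pvContrib p above below C x c = pvWt above below C x c * pvAt p x := by
  unfold pvContrib pvWt
  split_ifs <;> ring

def pvDot (C : Nat) (p h : List Int) : Int :=
  ((PySem.List.pyRange 0 (C : Int) 1).map (fun c => pvAt p c * pvAt h c)).sum

theorem pv_sum_single (C : Nat) (t : Int) (f : Int → Int) :
    ((PySem.List.pyRange 0 (C : Int) 1).map (fun c => if c = t then f c else 0)).sum =
      if 0 ≤ t ∧ t < (C : Int) then f t else 0 := by
  induction C with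
  | zero =>
    have h0 : PySem.List.pyRange 0 ((0 : Nat) : Int) 1 = [] := by decide
    rw [h0, List.map_nil, List.sum_nil, if_neg (by omega)]
  | succ C ih =>
    rw [show ((C + 1 : Nat) : Int) = (C : Int) + 1 from by push_cast; ring,
      PySem.List.pyRange_one_succ_right (by omega), List.map_append, List.sum_append,
      List.map_singleton, List.sum_singleton, ih]
    by_cases ht : (C : Int) = t
    · rw [if_pos ht, if_neg (by omega : ¬(0 ≤ t ∧ t < (C : Int))), if_pos (by omega), ht]
      ring
    · rw [if_neg ht, add_zero]
      by_cases h1 : 0 ≤ t ∧ t < (C : Int)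
      · rw [if_pos h1, if_pos (by omega)]
      · rw [if_neg h1, if_neg (by omega)]

theorem pv_sum_swap (l1 l2 : List Int) (f : Int → Int → Int) :
    (l1.map (fun c => (l2.map (fun x => f x c)).sum)).sum =
      (l2.map (fun x => (l1.map (fun c => f x c)).sum)).sum := by
  induction l1 with
  | nil => simp
  | cons c l1 ih =>
    rw [List.map_cons, List.sum_cons, ih]
    rw [show (fun x => ((c :: l1).map (fun c => f x c)).sum) =
      (fun x => f x c + (l1.map (fun c => f x c)).sum) from by
        funext x; rw [List.map_cons, List.sum_cons]]
    rw [PySem.List.sum_map_add_int]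

-- each entry of B's backward row is the weighted sum of the next row's counts
theorem pvAt_bwdRow (C : Nat) (above below : List Char) (g : List Int) (x : Int)
    (hx : 0 ≤ x ∧ x < (C : Int)) :
    pvAt (pvBwdRow C above below g) x =
      ((PySem.List.pyRange 0 (C : Int) 1).map
        (fun c => pvWt above below (C : Int) x c * pvAt g c)).sum := by
  unfold pvBwdRow
  rw [pvAt_map_pyRange _ C x, if_pos hx]
  by_cases hb : (PySem.List.pyGetD below x ' ' == '^') = true
  · simp only [if_pos hb]
    have hcongr : (PySem.List.pyRange 0 (C : Int) 1).map
        (fun c => pvWt above below (C : Int) x c * pvAt g c) =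
        (PySem.List.pyRange 0 (C : Int) 1).map
        (fun c => (if c = x - 1 ∧ 0 ≤ x - 1 ∧ x - 1 < (C : Int) then pvAt g c else 0) +
          (if c = x + 1 ∧ 0 ≤ x + 1 ∧ x + 1 < (C : Int) then pvAt g c else 0)) := by
      apply List.map_congr_left
      intro c _
      unfold pvWt
      rw [if_pos hb]
      split_ifs <;> ring
    rw [hcongr, PySem.List.sum_map_add_int]
    have e1 : ((PySem.List.pyRange 0 (C : Int) 1).map
        (fun c => if c = x - 1 ∧ 0 ≤ x - 1 ∧ x - 1 < (C : Int) then pvAt g c else 0)).sum =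
        if 1 ≤ x then PySem.List.pyGetD g (x - 1) 0 else 0 := by
      by_cases hp : 0 ≤ x - 1 ∧ x - 1 < (C : Int)
      · have : ∀ c, (if c = x - 1 ∧ 0 ≤ x - 1 ∧ x - 1 < (C : Int) then pvAt g c else 0) =
            (if c = x - 1 then pvAt g c else 0) := by
          intro c
          by_cases hc : c = x - 1
          · rw [if_pos ⟨hc, hp⟩, if_pos hc]
          · rw [if_neg (fun h => hc h.1), if_neg hc]
        simp only [this]
        rw [pv_sum_single C (x - 1) (pvAt g), if_pos hp,
          if_pos (show (1:Int) ≤ x by omega)]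
        exact (pv_pyGetD_eq_pvAt g (x - 1) (by omega)).symm
      · have h1x : ¬ (1:Int) ≤ x := by omega
        have : ∀ c, (if c = x - 1 ∧ 0 ≤ x - 1 ∧ x - 1 < (C : Int) then pvAt g c else 0) = 0 := by
          intro c; rw [if_neg (fun h => hp h.2)]
        simp only [this, if_neg h1x]
        simp
    have e2 : ((PySem.List.pyRange 0 (C : Int) 1).map
        (fun c => if c = x + 1 ∧ 0 ≤ x + 1 ∧ x + 1 < (C : Int) then pvAt g c else 0)).sum =
        if x + 1 < (C : Int) then PySem.List.pyGetD g (x + 1) 0 else 0 := by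
      by_cases hp : 0 ≤ x + 1 ∧ x + 1 < (C : Int)
      · have : ∀ c, (if c = x + 1 ∧ 0 ≤ x + 1 ∧ x + 1 < (C : Int) then pvAt g c else 0) =
            (if c = x + 1 then pvAt g c else 0) := by
          intro c
          by_cases hc : c = x + 1
          · rw [if_pos ⟨hc, hp⟩, if_pos hc]
          · rw [if_neg (fun h => hc h.1), if_neg hc]
        simp only [this]
        rw [pv_sum_single C (x + 1) (pvAt g), if_pos hp, if_pos hp.2]
        exact (pv_pyGetD_eq_pvAt g (x + 1) (by omega)).symm
      · have h1x : ¬ x + 1 < (C : Int) := by omega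
        have : ∀ c, (if c = x + 1 ∧ 0 ≤ x + 1 ∧ x + 1 < (C : Int) then pvAt g c else 0) = 0 := by
          intro c; rw [if_neg (fun h => hp h.2)]
        simp only [this, if_neg h1x]
        simp
    rw [e1, e2]
  · simp only [if_neg hb]
    by_cases ha : (PySem.List.pyGetD above x ' ' == '^') = true
    · simp only [if_pos ha]
      have : ∀ c, pvWt above below (C : Int) x c * pvAt g c = 0 := by
        intro c; unfold pvWt; rw [if_neg hb, if_pos ha]; ring
      simp only [this]
      simp
    · simp only [if_neg ha]
      have hcongr : (PySem.List.pyRange 0 (C : Int) 1).map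
          (fun c => pvWt above below (C : Int) x c * pvAt g c) =
          (PySem.List.pyRange 0 (C : Int) 1).map (fun c => if c = x then pvAt g c else 0) := by
        apply List.map_congr_left
        intro c _
        unfold pvWt
        rw [if_neg hb, if_neg ha]
        split_ifs <;> ring
      rw [hcongr, pv_sum_single C x (pvAt g), if_pos hx, pv_pyGetD_eq_pvAt g x hx.1]

-- adjointness of the forward step and the backward row
theorem pvDot_step (C : Nat) (p : List Int) (above below : List Char) (h : List Int)
    (hp : p.length = C) :
    pvDot C (pvStep C p above below) h = pvDot C p (pvBwdRow C above below h) := by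
  unfold pvDot
  have hstep := (pvStep_pointwise C p above below hp).2
  have hl : (PySem.List.pyRange 0 (C : Int) 1).map
      (fun c => pvAt (pvStep C p above below) c * pvAt h c) =
      (PySem.List.pyRange 0 (C : Int) 1).map
      (fun c => ((PySem.List.pyRange 0 (C : Int) 1).map
        (fun x => pvContrib p above below (C : Int) x c * pvAt h c)).sum) := by
    apply List.map_congr_left
    intro c _
    rw [hstep c, ← List.sum_map_mul_right]
  rw [hl, pv_sum_swap]
  apply congrArg
  apply List.map_congr_left
  intro x hxm
  have hx := PySem.List.mem_pyRange_one.1 hxm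
  rw [pvAt_bwdRow C above below h x hx, ← List.sum_map_mul_left]
  apply congrArg
  apply List.map_congr_left
  intro c _
  rw [pvContrib_eq_wt]
  ring

-- adjointness of the whole pass: forward fold against h = p against backward fold over the reverse
theorem pvDot_fold (C : Nat) (ps : List (List Char × List Char)) (p h : List Int)
    (hp : p.length = C) :
    pvDot C (ps.foldl (fun p ab => pvStep C p ab.1 ab.2) p) h =
      pvDot C p (ps.reverse.foldl (fun g ab => pvBwdRow C ab.1 ab.2 g) h) := by
  induction ps generalizing p h with
  | nil => simp
  | cons ab ps ih =>
    rw [List.foldl_cons, List.reverse_cons, List.foldl_append, List.foldl_cons, List.foldl_nil,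
      ih (pvStep C p ab.1 ab.2) _ (pvStep_pointwise C p ab.1 ab.2 hp).1,
      pvDot_step C p ab.1 ab.2 _ hp]

theorem pv_sum_eq_dot_ones (C : Nat) (p : List Int) (hp : p.length = C) :
    p.sum = pvDot C p (List.replicate C 1) := by
  unfold pvDot
  have hcongr : (PySem.List.pyRange 0 (C : Int) 1).map
      (fun c => pvAt p c * pvAt (List.replicate C (1 : Int)) c) =
      (PySem.List.pyRange 0 (C : Int) 1).map (fun c => PySem.List.pyGetD p c 0) := by
    apply List.map_congr_left
    intro c hcm
    have hc := PySem.List.mem_pyRange_one.1 hcm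
    rw [pvAt_replicate, if_pos ⟨hc.1, by omega⟩, pv_pyGetD_eq_pvAt p c hc.1]
    ring
  rw [hcongr, show ((C : Nat) : Int) = PySem.List.len p from by simp [hp],
    PySem.List.map_pyGetD_pyRange_zero]

theorem pv_filter_sum (l : List Int) (q : Int → Bool) (f : Int → Int) :
    ((l.filter q).map f).sum = (l.map (fun c => if q c then f c else 0)).sum := by
  induction l with
  | nil => simp
  | cons x l ih =>
    rw [List.filter_cons, List.map_cons, List.sum_cons]
    by_cases hq : q x
    · simp only [hq, if_true, List.map_cons, List.sum_cons, ih]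
    · simp only [hq, Bool.false_eq_true, if_false, ih]
      simp

-- B's index-driven bottom-up fold is the fold over the reversed (above, below) row pairs
theorem pv_bwd_fold_eq_zip (grid : List (List Char)) (C : Nat) (g0 : List Int) :
    (PySem.List.pyRange (PySem.List.len grid - 2) (-1) (-1)).foldl
      (fun g y => pvBwdRow C (PySem.List.pyGetD grid y []) (PySem.List.pyGetD grid (y + 1) []) g)
      g0 =
    ((grid.zip grid.tail).reverse).foldl (fun g ab => pvBwdRow C ab.1 ab.2 g) g0 := by
  have hr : PySem.List.pyRange (PySem.List.len grid - 2) (-1) (-1) =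
      (PySem.List.pyRange 0 (PySem.List.len grid - 1) 1).reverse := by
    rw [PySem.List.pyRange_neg_one_eq_reverse,
      show (-1 : Int) + 1 = 0 from by ring,
      show PySem.List.len grid - 2 + 1 = PySem.List.len grid - 1 from by ring]
  rw [hr]
  have hmap : (PySem.List.pyRange 0 (PySem.List.len grid - 1) 1).map
      (fun y => (PySem.List.pyGetD grid y [], PySem.List.pyGetD grid (y + 1) [])) =
      grid.zip grid.tail := by
    apply List.ext_getElem
    · simp [PySem.List.length_pyRange_one, List.length_zip, List.length_tail]
    · intro k h1 h2
      have hk : k < grid.length - 1 := by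
        simp only [List.length_map, PySem.List.length_pyRange_one, PySem.List.len_eq] at h1
        omega
      simp only [List.getElem_map, PySem.List.getElem_pyRange_one, List.getElem_zip]
      rw [show (0 : Int) + (k : Int) = ((k : Nat) : Int) from by push_cast; ring,
        show ((k : Nat) : Int) + 1 = ((k + 1 : Nat) : Int) from by push_cast; ring,
        PySem.List.pyGetD_natCast, PySem.List.pyGetD_natCast]
      have hk1 : k < grid.length := by omega
      have hk2 : k + 1 < grid.length := by omega
      rw [List.getD_eq_getElem?_getD, List.getElem?_eq_getElem hk1,
        List.getD_eq_getElem?_getD, List.getElem?_eq_getElem hk2]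
      simp [List.getElem_tail]
  rw [← hmap, ← List.map_reverse, List.foldl_map]

theorem pv_main (grid_lines : List String) :
    count_timelines grid_lines = count_timelines_alt grid_lines := by
  by_cases hrows : grid_lines.map pvRstripNl = []
  · simp [count_timelines, count_timelines_alt, hrows]
  · simp only [count_timelines, count_timelines_alt, if_neg hrows]
    generalize hG : grid_lines.map pvRstripNl = rows at hrows ⊢
    obtain ⟨r, rs, rfl⟩ := List.exists_cons_of_ne_nil hrows
    set CB : Nat := ((r :: rs).map List.length).foldl max 0 with hCB
    have hCA : (match (r :: rs).map (fun row => PySem.List.len row) with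
        | [] => (0 : Int)
        | h :: t => t.foldl max h) = ((CB : Nat) : Int) := by
      rw [List.map_cons]
      show List.foldl max (PySem.List.len r) (rs.map (fun row => PySem.List.len row)) = _
      have hm : rs.map (fun row => PySem.List.len row) =
          (rs.map List.length).map (fun x : Nat => (x : Int)) := by
        rw [List.map_map]
        rfl
      rw [hm, PySem.List.len_eq, pv_foldl_max_cast]
      have hfold : List.foldl max r.length (List.map List.length rs) = CB := by
        rw [hCB, List.map_cons, List.foldl_cons, Nat.zero_max]
      rw [hfold]
    rw [hCA]
    have hbound : ∀ a ∈ r :: rs, a.length ≤ CB := by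
      intro a ha
      have := (PySem.List.le_foldl_max ((r :: rs).map List.length) 0).2
      exact this a.length (List.mem_map_of_mem ha)
    have hgrid : ((r :: rs).map (fun row =>
          if PySem.List.len row < ((CB : Nat) : Int) then
            row ++ List.replicate (((CB : Int)) - PySem.List.len row).toNat ' ' else row)).map
        (fun row => row ++ List.replicate (((CB : Int)) - PySem.List.len row).toNat ' ') =
        (r :: rs).map (fun row => pvLjust row CB) := by
      rw [List.map_map]
      apply List.map_congr_left
      intro a ha
      exact pv_pad_eq a CB (hbound a ha)
    rw [hgrid]
    set grid : List (List Char) := (r :: rs).map (fun row => pvLjust row CB) with hgriddef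
    have hgl : grid.length = rs.length + 1 := by simp [hgriddef]
    have hRt : (PySem.List.len (r :: rs)).toNat = rs.length + 1 := by
      simp [PySem.List.len_eq]
    have hCt : (((CB : Nat) : Int)).toNat = CB := Int.toNat_natCast CB
    rw [hRt, hCt]
    have hRm1 : PySem.List.len (r :: rs) - 1 = ((rs.length : Nat) : Int) := by
      simp [PySem.List.len_eq]
    rw [hRm1]
    -- A side: the final row is the forward fold of pvStep over the (above, below) pairs
    obtain ⟨i1, i2, i3, i4, i5, i6, i7⟩ := pv_init_state
      (fun c => PySem.List.pyGetD (PySem.List.pyGetD grid 0 []) c ' ' == 'S')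
      (rs.length + 1) CB (by omega)
    obtain ⟨o1, o2, o3, o4, o5, o6, o7⟩ := pv_outer grid CB
      ((PySem.List.pyRange 0 ((CB : Nat) : Int) 1).foldl
        (fun st c => if PySem.List.pyGetD (PySem.List.pyGetD grid 0 []) c ' ' == 'S' then
          (pvMSet st.1 0 c 1, PySem.Set.add st.2 c) else st)
        (List.replicate (rs.length + 1) (List.replicate CB 0), (PySem.Set.empty : PySem.Set Int)))
      ((PySem.List.pyRange 0 ((CB : Nat) : Int) 1).map
        (fun c => if PySem.List.pyGetD (PySem.List.pyGetD grid 0 []) c ' ' == 'S' then (1 : Int) else 0))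
      (by rw [i1, hgl]) i2 (by intro j hj hjl; exact i3 j hj (by omega)) i4 i5 i6 i7
      rs.length (by omega)
    rw [pvRow_def, o2]
    have htakeFull : (grid.zip grid.tail).take rs.length = grid.zip grid.tail := by
      apply List.take_of_length_le
      rw [List.length_zip, List.length_tail, hgl]
      simp
    rw [htakeFull] at o2 o4 ⊢
    set p0 : List Int := (PySem.List.pyRange 0 ((CB : Nat) : Int) 1).map
      (fun c => if PySem.List.pyGetD (PySem.List.pyGetD grid 0 []) c ' ' == 'S' then (1 : Int) else 0)
      with hp0
    -- B side: the index-driven bottom-up fold is the fold over the reversed row pairs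
    rw [pv_bwd_fold_eq_zip grid CB (List.replicate CB 1)]
    set fin := ((grid.zip grid.tail).reverse).foldl
      (fun g ab => pvBwdRow CB ab.1 ab.2 g) (List.replicate CB 1) with hfin
    -- B's filtered sum is the dot product of the indicator row p0 with fin
    have hBsum : (((PySem.List.pyRange 0 ((CB : Nat) : Int) 1).filter
        (fun c => PySem.List.pyGetD (PySem.List.pyGetD grid 0 []) c ' ' == 'S')).map
        (fun c => PySem.List.pyGetD fin c 0)).sum = pvDot CB p0 fin := by
      rw [pv_filter_sum]
      unfold pvDot
      apply congrArg
      apply List.map_congr_left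
      intro c hcm
      have hc := PySem.List.mem_pyRange_one.1 hcm
      rw [hp0, pvAt_map_pyRange _ CB c, if_pos hc, pv_pyGetD_eq_pvAt fin c hc.1]
      by_cases hs : (PySem.List.pyGetD (PySem.List.pyGetD grid 0 []) c ' ' == 'S') = true
      · simp [hs]
      · simp [hs]
    rw [hBsum]
    -- chain: A's bottom-row sum = ⟨forward fold, ones⟩ = ⟨p0, backward fold⟩ = B
    rw [pv_sum_eq_dot_ones CB _ o4, pvDot_fold CB (grid.zip grid.tail) p0
      (List.replicate CB 1) i4]

-- ===== VERDICT (by name: the statement is the Claim_ definition above) =====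
theorem count_timelines_spec : Claim_equal_count_timelines := by
  intro grid_lines _
  unfold Spec_count_timelines
  exact pv_main grid_lines
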